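-- pv_equiv track=rewrite | github.com/nhcha6/MersProject | MersProject/Mers.py | combinePeptides
-- ===== SOURCE A (Python) =====
-- def combinePeptides(seqDict):
--
--     """
--     This function is called by Fasta.transOutput(). It takes a dictionary with protein names as keys and proteins sequences as values and concatenates the sequences
--     to form one sequence. It returns a list of the initial protein names and a list of references denoting where
--     the initial proteins appear in the long, concatenated protein.
--
--     :param seqDict: a dictionary with protein names as keys and proteins sequences as values.
--     :return finalPeptide: a single sequence of all the individual protein sequences concatenated together.
--     :return protIndexList: a list of index pairs denoting the start and end position of each individual protein.
--     List is structures as follows: [[0,150], [151,205] ... ]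
--     :return protList: a list of the protein names of the individual proteins, where the index of each name corresponds
--     to the index of its location data in protIndexList.
--     """
--
--     # declare variables to be created within for loop.
--     dictlist = []
--     protIndexList = []
--     protList = []
--     # initial ind is 0, and is updated by the length of the protein added each iteration.
--     ind = 0
--     for key, value in seqDict.items():
--         dictlist.append(value)
--         protIndexList.append([ind,ind + len(value) - 1])
--         protList.append(key)
--         ind += len(value)
--
--     # combine all protein sequences in dictList to form a long, concatenated sequence.
--     finalPeptide = ''.join(dictlist)
--     return finalPeptide, protIndexList, protList
-- ===== SOURCE B (Python) =====
-- def combinePeptides(seqDict):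
--     items = list(seqDict.items())
--
--     def merge(lo, hi):
--         # divide and conquer over items[lo:hi]: solve each half independently,
--         # then splice them, shifting the right half's intervals by the left
--         # half's total length
--         if hi - lo == 0:
--             return '', [], []
--         if hi - lo == 1:
--             key, value = items[lo]
--             return value, [[0, len(value) - 1]], [key]
--         mid = (lo + hi) // 2
--         pepL, idxL, namesL = merge(lo, mid)
--         pepR, idxR, namesR = merge(mid, hi)
--         off = len(pepL)
--         shiftedR = [[x + off for x in pair] for pair in idxR]
--         return pepL + pepR, idxL + shiftedR, namesL + namesR
--
--     return merge(0, len(items))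
-- ===== Notes on version B (the rewrite author's own statement) =====
-- stated objective: alternative
-- what changed: Replaces A's single forward loop threading a running start index through four accumulators by divide and conquer: split the item list in halves, solve each half independently, then splice the results, shifting the right half's intervals by the left half's total length.
import Mathlib
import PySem

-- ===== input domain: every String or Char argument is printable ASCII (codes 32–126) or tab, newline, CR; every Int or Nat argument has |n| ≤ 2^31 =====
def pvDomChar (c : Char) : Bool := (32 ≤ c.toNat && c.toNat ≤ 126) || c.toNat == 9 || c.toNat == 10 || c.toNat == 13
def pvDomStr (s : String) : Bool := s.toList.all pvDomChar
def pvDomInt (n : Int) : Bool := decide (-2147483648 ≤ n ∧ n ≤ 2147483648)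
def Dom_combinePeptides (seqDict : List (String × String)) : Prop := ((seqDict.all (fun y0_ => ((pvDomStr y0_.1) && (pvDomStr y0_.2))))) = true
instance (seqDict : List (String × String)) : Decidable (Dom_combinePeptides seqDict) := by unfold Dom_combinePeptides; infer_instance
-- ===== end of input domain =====

-- B replaces A's single forward loop threading a running index by divide and conquer: split the
-- items in halves, solve each independently, splice with an offset shift of the right half.


-- ===== PORT A =====
-- literal transliteration: one loop over the items extending dictlist/protIndexList/protList
-- and the running index ind, then ''.join(dictlist)
def combinePeptides (seqDict : List (String × String)) : String × List (List Int) × List String :=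
  let st := seqDict.foldl
    (fun (st : List String × List (List Int) × List String × Int) kv =>
      let dictlist := st.1; let protIndexList := st.2.1; let protList := st.2.2.1; let ind := st.2.2.2
      (dictlist ++ [kv.2],
       protIndexList ++ [[ind, ind + PySem.Str.len kv.2 - 1]],
       protList ++ [kv.1],
       ind + PySem.Str.len kv.2))
    ([], [], [], 0)
  (PySem.Str.join "" st.1, st.2.1, st.2.2.1)

-- ===== PORT B =====
-- literal transliteration of Source B's merge(lo, hi): recursion on the sublist items[lo:hi]
-- (left half = take (len/2), right half = drop (len/2), as (lo+hi)//2 - lo = (hi-lo)//2)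
def pvMerge : List (String × String) → String × List (List Int) × List String
  | [] => ("", [], [])
  | [kv] => (kv.2, [[(0 : Int), PySem.Str.len kv.2 - 1]], [kv.1])
  | kv1 :: kv2 :: rest =>
    let l := kv1 :: kv2 :: rest
    let mid := l.length / 2
    let L := pvMerge (l.take mid)
    let R := pvMerge (l.drop mid)
    let off : Int := PySem.Str.len L.1
    let shiftedR := R.2.1.map (fun pair => pair.map (fun x => x + off))
    (L.1 ++ R.1, L.2.1 ++ shiftedR, L.2.2 ++ R.2.2)
termination_by l => l.length
decreasing_by
  · simp; omega
  · simp; omega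

def combinePeptides_alt (seqDict : List (String × String)) : String × List (List Int) × List String :=
  pvMerge seqDict

-- ===== PRECONDITION & SPEC =====
def Spec_combinePeptides (seqDict : List (String × String)) (out : String × List (List Int) × List String) : Prop := out = combinePeptides_alt seqDict
instance (seqDict : List (String × String)) (out : String × List (List Int) × List String) : Decidable (Spec_combinePeptides seqDict out) := by unfold Spec_combinePeptides; infer_instance

-- ===== CLAIM (what is proved, stated in full; the proofs are below) =====
def Claim_equal_combinePeptides : Prop := ∀ (seqDict : List (String × String)), Dom_combinePeptides seqDict → Spec_combinePeptides seqDict (combinePeptides seqDict)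

-- ===== LEMMAS AND PROOFS =====

theorem flatten_intersperse_nil (ls : List (List Char)) : (List.intersperse [] ls).flatten = ls.flatten := by
  induction ls with
  | nil => rfl
  | cons x ls ih => cases ls with
    | nil => simp
    | cons y ls => simp_all [List.intersperse]

-- ''.join on the Chars side is just flatten
theorem chars_join_nil (ls : List (List Char)) : PySem.Chars.join [] ls = ls.flatten := by
  simp [PySem.Chars.join, List.intercalate, flatten_intersperse_nil]

theorem join_empty_eq (vs : List String) :
    PySem.Str.join "" vs = String.ofList (vs.map String.toList).flatten := by
  simp [PySem.Str.join, chars_join_nil]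

theorem join_empty_append (vs ws : List String) :
    PySem.Str.join "" (vs ++ ws) = PySem.Str.join "" vs ++ PySem.Str.join "" ws := by
  apply String.ext
  simp [join_empty_eq, String.toList_ofList]

theorem len_join_empty (vs : List String) :
    (PySem.Str.len (PySem.Str.join "" vs) : Int) = (vs.map (fun v => (PySem.Str.len v : Int))).sum := by
  simp [join_empty_eq, PySem.Str.len_eq, String.toList_ofList, List.length_flatten,
    Function.comp_def]

-- gIdx: the interval list, characterised head-first (proof-side helper only)
def gIdx : List (String × String) → List (List Int)
  | [] => []
  | kv :: rest => [(0 : Int), PySem.Str.len kv.2 - 1] :: (gIdx rest).map (fun pair => pair.map (fun x => x + PySem.Str.len kv.2))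

theorem gIdx_append (l1 l2 : List (String × String)) :
    gIdx (l1 ++ l2) = gIdx l1 ++ (gIdx l2).map (fun pair =>
      pair.map (fun x => x + (l1.map (fun kv => (PySem.Str.len kv.2 : Int))).sum)) := by
  induction l1 with
  | nil => simp [gIdx]
  | cons kv l1 ih =>
    simp only [List.cons_append, gIdx, ih, List.map_append, List.map_map, List.map_cons,
      List.sum_cons]
    congr 2
    apply List.map_congr_left
    intro pair _
    simp only [Function.comp_apply, List.map_map]
    apply List.map_congr_left
    intro x _
    simp only [Function.comp_apply]
    ring

-- pvMerge computes the join of the values, gIdx, and the keys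
theorem pvMerge_eq (l : List (String × String)) :
    pvMerge l = (PySem.Str.join "" (l.map (·.2)), gIdx l, l.map (·.1)) := by
  fun_induction pvMerge l with
  | case1 => simp [gIdx, join_empty_eq]
  | case2 kv =>
    simp [gIdx, join_empty_eq]
  | case3 kv1 kv2 rest l mid L R off shiftedR ihT ihD =>
    simp only [l, mid, L, R, off, shiftedR, ihT, ihD]
    have hsplit : (kv1 :: kv2 :: rest) =
        (kv1 :: kv2 :: rest).take ((kv1 :: kv2 :: rest).length / 2) ++
        (kv1 :: kv2 :: rest).drop ((kv1 :: kv2 :: rest).length / 2) := by simp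
    refine Prod.ext ?_ (Prod.ext ?_ ?_)
    · show _ ++ _ = _
      rw [← join_empty_append, ← List.map_append, List.take_append_drop]
    · show _ ++ _ = _
      conv_rhs => rw [hsplit]
      rw [gIdx_append, len_join_empty]
      simp [List.map_map, Function.comp_def]
    · show _ ++ _ = _
      conv_rhs => rw [hsplit]
      simp

-- invariant of A's loop: the interval list it appends is gIdx shifted by ind
theorem foldlA_eq (sd : List (String × String)) (dl : List String) (pil : List (List Int))
    (pl : List String) (ind : Int) :
    sd.foldl
      (fun (st : List String × List (List Int) × List String × Int) kv =>
        (st.1 ++ [kv.2],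
         st.2.1 ++ [[st.2.2.2, st.2.2.2 + PySem.Str.len kv.2 - 1]],
         st.2.2.1 ++ [kv.1],
         st.2.2.2 + PySem.Str.len kv.2))
      (dl, pil, pl, ind)
      = (dl ++ sd.map (·.2),
         pil ++ (gIdx sd).map (fun pair => pair.map (fun x => x + ind)),
         pl ++ sd.map (·.1),
         ind + (sd.map (fun kv => (PySem.Str.len kv.2 : Int))).sum) := by
  induction sd generalizing dl pil pl ind with
  | nil => simp [gIdx]
  | cons kv sd ih =>
    simp only [List.foldl_cons, List.map_cons, List.sum_cons]
    rw [ih]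
    refine Prod.ext (by simp) (Prod.ext ?_ (Prod.ext (by simp) (by simp; ring)))
    simp only [gIdx, List.map_cons, List.map_map, List.append_assoc, List.cons_append]
    congr 2
    · simp; ring
    · apply List.map_congr_left
      intro pair _
      simp only [Function.comp_apply, List.map_map]
      apply List.map_congr_left
      intro x _
      simp only [Function.comp_apply]
      ring

-- ===== VERDICT (by name: the statement is the Claim_ definition above) =====
theorem combinePeptides_spec : Claim_equal_combinePeptides := by
  intro seqDict _
  show _ = _
  simp only [combinePeptides, combinePeptides_alt]
  rw [foldlA_eq, pvMerge_eq]
  simp
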